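-- pv_equiv track=rewrite | github.com/joshanashakya/dissertation | workspace/dataset/java-python/GeeksForGeeks/2884/A/2.py | spellsCount
-- ===== SOURCE A (Python) =====
-- def spellsCount(num):
--
--     n = len(num);
--
--     # final count of total
--     # possible spells
--     result = 1;
--
--     # iterate through complete
--     # number
--     i = 0;
--     while(i<n):
--
--         # count contiguous frequency
--         # of particular digit num[i]
--         count = 1;
--         while (i < n - 1 and
--                num[i + 1] == num[i]):
--
--             count += 1;
--             i += 1;
--
--         # Compute 2^(count-1) and
--         # multiply with result
--         result = result * int(pow(2, count - 1));
--         i += 1;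
--     return result;
-- ===== SOURCE B (Python) =====
-- def spellsCount(num):
--     n = len(num)
--     runs = 0 if n == 0 else 1 + sum(1 for i in range(1, n) if num[i] != num[i - 1])
--     return 1 << (n - runs)
-- ===== Notes on version B (the rewrite author's own statement) =====
-- stated objective: simpler
-- what changed: Replaces A's nested run-grouping loop that multiplies the big-int result by 2^(count-1) per run with a flat scan counting run boundaries followed by a single shift 1 << (len-runs).
import Mathlib
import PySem

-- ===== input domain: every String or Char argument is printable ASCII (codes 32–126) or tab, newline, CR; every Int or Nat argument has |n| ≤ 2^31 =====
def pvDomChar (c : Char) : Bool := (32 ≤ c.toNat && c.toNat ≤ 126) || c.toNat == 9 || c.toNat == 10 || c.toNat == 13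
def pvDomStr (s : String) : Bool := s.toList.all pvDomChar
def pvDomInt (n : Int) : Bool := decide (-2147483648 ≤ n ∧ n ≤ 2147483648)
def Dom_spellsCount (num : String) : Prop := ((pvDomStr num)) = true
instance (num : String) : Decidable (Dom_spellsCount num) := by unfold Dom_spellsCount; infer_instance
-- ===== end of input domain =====

-- B replaces A's nested run-grouping loop with a flat count of run boundaries and one closed-form power (simpler).

-- ===== PORT A =====
-- inner while: counts how many further chars continue the run started at the previous char c
def spellsRun (c : Char) : List Char → Nat
  | [] => 0
  | d :: rest => if d == c then spellsRun d rest + 1 else 0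

-- outer while: one iteration per run; multiplies result by 2^(count-1) = 2^(spellsRun …)
def spellsLoop : List Char → Int
  | [] => 1
  | c :: rest =>
    let k := spellsRun c rest
    (2 : Int) ^ k * spellsLoop (rest.drop k)
  termination_by l => l.length
  decreasing_by
    simp only [List.length_drop, List.length_cons]
    omega

def spellsCount (num : String) : Int := spellsLoop num.toList

-- ===== PORT B =====
-- number of indices i ≥ 1 with num[i] ≠ num[i-1], as a countP over adjacent pairs
def spellsCount_alt (num : String) : Int :=
  let l := num.toList
  let n := l.length
  let runs := if n = 0 then 0 else 1 + (l.zip l.tail).countP (fun p => p.1 != p.2)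
  (2 : Int) ^ (n - runs)

-- ===== PRECONDITION & SPEC =====
def Spec_spellsCount (num : String) (out : Int) : Prop := out = spellsCount_alt num
instance (num : String) (out : Int) : Decidable (Spec_spellsCount num out) := by unfold Spec_spellsCount; infer_instance

-- ===== CLAIM (what is proved, stated in full; the proofs are below) =====
def Claim_equal_spellsCount : Prop := ∀ (num : String), Dom_spellsCount num → Spec_spellsCount num (spellsCount num)

-- ===== LEMMAS AND PROOFS =====

-- number of adjacent EQUAL pairs
def eqPairs (l : List Char) : Nat := (l.zip l.tail).countP (fun p => p.1 == p.2)

theorem eqPairs_cons_cons (c d : Char) (t : List Char) :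
    eqPairs (c :: d :: t) = (if c = d then 1 else 0) + eqPairs (d :: t) := by
  simp only [eqPairs, List.tail_cons, List.zip_cons_cons, List.countP_cons]
  by_cases h : c = d <;> (simp [h]; try omega)

theorem eqPairs_run (c : Char) (rest : List Char) :
    eqPairs (c :: rest) = spellsRun c rest + eqPairs (rest.drop (spellsRun c rest)) := by
  induction rest generalizing c with
  | nil => simp [eqPairs, spellsRun]
  | cons d t ih =>
    by_cases h : d = c
    · subst h
      rw [eqPairs_cons_cons]
      simp only [spellsRun, if_pos (beq_self_eq_true d), List.drop_succ_cons]
      rw [ih d, if_pos trivial]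
      omega
    · rw [eqPairs_cons_cons]
      have hb : (d == c) = false := beq_eq_false_iff_ne.mpr h
      simp only [spellsRun, hb]
      have : c ≠ d := fun he => h he.symm
      simp [this]

theorem spellsLoop_eq (l : List Char) : spellsLoop l = (2 : Int) ^ eqPairs l := by
  induction l using spellsLoop.induct with
  | case1 => simp [spellsLoop, eqPairs]
  | case2 c rest k ih =>
    rw [spellsLoop]
    rw [ih, ← pow_add, eqPairs_run c rest]

theorem countP_not_add (l : List (Char × Char)) (p : Char × Char → Bool) :
    l.countP p + l.countP (fun x => !p x) = l.length := by
  induction l with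
  | nil => simp
  | cons a t ih => simp only [List.countP_cons]; cases h : p a <;> simp [h] <;> omega

theorem neq_add_eq (l : List Char) :
    (l.zip l.tail).countP (fun p => p.1 != p.2) + eqPairs l = l.length - 1 := by
  have h := countP_not_add (l.zip l.tail) (fun p => p.1 != p.2)
  have hlen : (l.zip l.tail).length = l.length - 1 := by simp
  have he : ((l.zip l.tail).countP fun x => !(x.1 != x.2)) = eqPairs l := by
    simp only [eqPairs, bne, Bool.not_not]
  omega

-- ===== VERDICT (by name: the statement is the Claim_ definition above) =====
theorem spellsCount_spec : Claim_equal_spellsCount := by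
  intro num _
  unfold Spec_spellsCount spellsCount spellsCount_alt
  rw [spellsLoop_eq]
  generalize num.toList = l
  congr 1
  cases l with
  | nil => simp [eqPairs]
  | cons c rest =>
    have h := neq_add_eq (c :: rest)
    simp only [List.length_cons, List.tail_cons] at h ⊢
    rw [if_neg (Nat.succ_ne_zero rest.length)]
    omega
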